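-- pv_equiv track=rewrite | github.com/TomF0x/CodeWars | Python/6 kyu/Find The Parity Outlier.py | find_outlier
-- ===== SOURCE A (Python) =====
-- def find_outlier(integers):
--     lst=[a%2==0 for a in integers]
--     if lst.count(False)>lst.count(True):
--         for i in range(len(integers)):
--             if integers[i]%2==0:
--                 return integers[i]
--     if lst.count(False)<lst.count(True):
--         for i in range(len(integers)):
--             if integers[i]%2==1:
--                 return integers[i]
-- ===== SOURCE B (Python) =====
-- def find_outlier(integers):
--     # single pass with an accumulator: running parity counts and the first
--     # value of each parity, decided once at the end (no lists, no re-scan)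
--     evens = odds = 0
--     first_even = first_odd = None
--     for x in integers:
--         if x % 2 == 0:
--             evens += 1
--             if first_even is None:
--                 first_even = x
--         else:
--             odds += 1
--             if first_odd is None:
--                 first_odd = x
--     if odds > evens:
--         return first_even
--     if evens > odds:
--         return first_odd
--     return None
-- ===== Notes on version B (the rewrite author's own statement) =====
-- stated objective: alternative
-- what changed: B is a single pass with an accumulator (running even/odd counts plus the first value seen of each parity, decided once at the end), replacing A's staged passes: a boolean mask list, two count() calls and a separate index-based re-scan.
-- outside the precondition, e.g. on find_outlier([1, 3, 5]): A returns None, B returns None; on find_outlier([1, 2]): A returns None, B returns None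
import Mathlib
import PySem

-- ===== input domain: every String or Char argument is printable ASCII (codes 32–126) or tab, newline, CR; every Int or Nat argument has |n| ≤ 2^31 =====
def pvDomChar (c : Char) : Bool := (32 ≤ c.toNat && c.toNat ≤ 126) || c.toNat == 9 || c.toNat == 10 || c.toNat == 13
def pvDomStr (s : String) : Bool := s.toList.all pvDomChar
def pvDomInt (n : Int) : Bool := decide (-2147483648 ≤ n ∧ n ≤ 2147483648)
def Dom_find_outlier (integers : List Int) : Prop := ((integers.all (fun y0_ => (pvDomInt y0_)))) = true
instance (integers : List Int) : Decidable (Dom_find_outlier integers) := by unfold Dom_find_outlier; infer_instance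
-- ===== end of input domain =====

-- B is a single pass with an accumulator (running parity counts + first value of each parity),
-- replacing A's staged passes (boolean mask, two count() calls, index re-scan); equivalence on Pre_ (A returns an int there).


-- ===== PORT A =====
-- the for-loop over range(len(integers)) returning the first element with the given parity
def pvALoop (p : Int → Bool) : List Int → Option Int
  | [] => none
  | x :: xs => if p x then some x else pvALoop p xs

-- None (outside Pre_) is represented by 0
def find_outlier (integers : List Int) : Int :=
  let lst := integers.map (fun a => PySem.Int.mod a 2 == 0)
  if lst.count false > lst.count true then
    (pvALoop (fun a => PySem.Int.mod a 2 == 0) integers).getD 0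
  else if lst.count false < lst.count true then
    (pvALoop (fun a => PySem.Int.mod a 2 == 1) integers).getD 0
  else 0

-- ===== PORT B =====
-- the loop body: state = (evens, odds, first_even, first_odd)
def pvBStep (s : Nat × Nat × Option Int × Option Int) (x : Int) :
    Nat × Nat × Option Int × Option Int :=
  if PySem.Int.mod x 2 == 0 then
    (s.1 + 1, s.2.1, (s.2.2.1).orElse (fun _ => some x), s.2.2.2)
  else
    (s.1, s.2.1 + 1, s.2.2.1, (s.2.2.2).orElse (fun _ => some x))

-- None (outside Pre_) is represented by 0
def find_outlier_alt (integers : List Int) : Int :=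
  let s := integers.foldl pvBStep (0, 0, none, none)
  if s.2.1 > s.1 then (s.2.2.1).getD 0
  else if s.1 > s.2.1 then (s.2.2.2).getD 0
  else 0

-- ===== PRECONDITION & SPEC =====
-- Pre_ excludes the inputs on which A falls off the end and returns None (no value of the
-- declared int type): parity counts tied, or the minority-parity bucket empty (all same parity).
def Pre_find_outlier (integers : List Int) : Prop :=
  let e := integers.countP (fun x => PySem.Int.mod x 2 == 0)
  let o := integers.countP (fun x => PySem.Int.mod x 2 != 0)
  (o > e ∧ 0 < e) ∨ (e > o ∧ 0 < o)
instance (integers : List Int) : Decidable (Pre_find_outlier integers) := by unfold Pre_find_outlier; infer_instance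
def pvWitness_find_outlier : List Int := [2, 4, 6, 3]
def Spec_find_outlier (integers : List Int) (out : Int) : Prop := out = find_outlier_alt integers
instance (integers : List Int) (out : Int) : Decidable (Spec_find_outlier integers out) := by unfold Spec_find_outlier; infer_instance

-- ===== CLAIM (what is proved, stated in full; the proofs are below) =====
def Claim_equal_find_outlier : Prop := ∀ (integers : List Int), Dom_find_outlier integers → Pre_find_outlier integers → Spec_find_outlier integers (find_outlier integers)

-- ===== LEMMAS AND PROOFS =====

theorem mod2_eq (a : Int) : PySem.Int.mod a 2 = a % 2 :=
  PySem.Int.mod_eq_emod_of_pos (by norm_num)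

theorem mod_two_cases (a : Int) : a % 2 = 0 ∨ a % 2 = 1 := by omega

theorem pvALoop_eq_head_filter (p : Int → Bool) (xs : List Int) :
    pvALoop p xs = (xs.filter p).head? := by
  induction xs with
  | nil => rfl
  | cons x xs ih =>
    by_cases h : p x <;> simp [pvALoop, List.filter_cons, h, ih]

theorem count_false_eq (xs : List Int) :
    (xs.map (fun a => a % 2 == 0)).count false
      = xs.countP (fun x => x % 2 != 0) := by
  induction xs with
  | nil => rfl
  | cons x xs ih =>
    by_cases h : x % 2 = 0 <;>
      simp [List.count_cons, List.countP_cons, h, ih]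

theorem count_true_eq (xs : List Int) :
    (xs.map (fun a => a % 2 == 0)).count true
      = xs.countP (fun x => x % 2 == 0) := by
  induction xs with
  | nil => rfl
  | cons x xs ih =>
    by_cases h : x % 2 = 0 <;>
      simp [List.count_cons, List.countP_cons, h, ih]

theorem odd_pred_eq (xs : List Int) :
    xs.filter (fun a => a % 2 == 1) = xs.filter (fun x => x % 2 != 0) := by
  apply List.filter_congr
  intro x _
  rcases mod_two_cases x with h | h <;> simp [h]

-- the fold invariant: counts accumulate, the first-seen options fill in left to right
theorem foldl_pvBStep (xs : List Int) (e o : Nat) (fe fo : Option Int) :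
    xs.foldl pvBStep (e, o, fe, fo) =
      (e + xs.countP (fun x => x % 2 == 0),
       o + xs.countP (fun x => x % 2 != 0),
       fe.orElse (fun _ => (xs.filter (fun x => x % 2 == 0)).head?),
       fo.orElse (fun _ => (xs.filter (fun x => x % 2 != 0)).head?)) := by
  induction xs generalizing e o fe fo with
  | nil => cases fe <;> cases fo <;> rfl
  | cons x xs ih =>
    simp only [List.foldl_cons, pvBStep, mod2_eq]
    by_cases h : x % 2 = 0
    · simp only [h, decide_true, if_pos (by simp : ((0:Int) == 0) = true)]
      rw [ih]
      cases fe <;>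
        simp [List.countP_cons, List.filter_cons, h, Option.orElse, Nat.add_assoc, Nat.add_comm 1]
    · have h1 : x % 2 = 1 := by rcases mod_two_cases x with h' | h' <;> [exact absurd h' h; exact h']
      simp only [h1]
      rw [if_neg (by simp), ih]
      cases fo <;>
        simp [List.countP_cons, List.filter_cons, h, Option.orElse, Nat.add_assoc, Nat.add_comm 1]

-- ===== VERDICT (by name: the statement is the Claim_ definition above) =====
theorem find_outlier_spec : Claim_equal_find_outlier := by
  intro integers _ hpre
  unfold Spec_find_outlier find_outlier find_outlier_alt
  unfold Pre_find_outlier at hpre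
  simp only [mod2_eq] at hpre ⊢
  rw [foldl_pvBStep]
  simp only [count_false_eq, count_true_eq, pvALoop_eq_head_filter, odd_pred_eq,
    Nat.zero_add, Option.orElse]
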